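-- pv_equiv track=rewrite | github.com/vernonrj/advent2022 | day08/puzzle08.py | not_visible_2d
-- ===== SOURCE A (Python) =====
-- from typing import Iterator, Tuple
--
-- def not_visible_2d(nums: list[list[int]]) -> Tuple[int, int, int]:
--     """returns indexes of `nums` that are not "visible" from the outside"""
--     for (colidx, col) in enumerate(nums[1:-1], start=1):
--         for (rowidx, value) in enumerate(col[1:-1], start=1):
--             if max(col[:rowidx]) < value:
--                 continue
--             if max(col[rowidx+1:]) < value:
--                 continue
--             inverted = [x[rowidx] for x in nums]
--             if max(inverted[:colidx]) < value:
--                 continue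
--             if max(inverted[colidx+1:]) < value:
--                 continue
--             yield ((colidx, rowidx), value)
-- ===== SOURCE B (Python) =====
-- def prefix_max(xs):
--     out = []
--     m = None
--     for v in xs:
--         out.append(m)
--         m = v if m is None or m < v else m
--     return out
--
--
-- def suffix_max(xs):
--     return prefix_max(xs[::-1])[::-1]
--
--
-- def not_visible_2d(nums):
--     n = len(nums)
--     if n == 0:
--         return
--     w = min(len(r) for r in nums)
--     ups = []
--     downs = []
--     for j in range(w):
--         col = [r[j] for r in nums]
--         ups.append(prefix_max(col))
--         downs.append(suffix_max(col))
--     for i in range(1, n - 1):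
--         row = nums[i]
--         left = prefix_max(row)
--         right = suffix_max(row)
--         for j in range(1, len(row) - 1):
--             v = row[j]
--             if left[j] >= v and right[j] >= v and ups[j][i] >= v and downs[j][i] >= v:
--                 yield ((i, j), v)
-- ===== Notes on version B (the rewrite author's own statement) =====
-- stated objective: faster
-- what changed: Instead of re-scanning the four arms of every interior cell with max() (O(n+m) per cell), B precomputes prefix/suffix running maxima for every row and column once and answers each cell's four visibility tests in O(1).
import Mathlib
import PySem

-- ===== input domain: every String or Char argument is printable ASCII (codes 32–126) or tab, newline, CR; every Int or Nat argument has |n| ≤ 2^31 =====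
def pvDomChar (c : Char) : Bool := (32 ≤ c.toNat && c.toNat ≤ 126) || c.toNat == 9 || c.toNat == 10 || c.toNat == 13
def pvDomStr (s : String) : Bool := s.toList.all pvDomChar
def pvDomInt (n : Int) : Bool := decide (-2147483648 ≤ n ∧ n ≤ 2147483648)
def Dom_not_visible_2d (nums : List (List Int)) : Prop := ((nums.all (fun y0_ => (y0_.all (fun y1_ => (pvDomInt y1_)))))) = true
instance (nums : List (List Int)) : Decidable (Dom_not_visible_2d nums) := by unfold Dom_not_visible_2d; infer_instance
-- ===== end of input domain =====

-- B precomputes prefix/suffix running maxima for every row and column (one pass each) instead of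
-- A's per-cell max() scans of the four arms; proved to return the same list on all of Pre_.
-- (A is a generator; the proved equality is about the list of yielded values.)


-- ===== PORT A =====
def pymax (xs : List Int) : Int := (PySem.List.max? xs (fun y => y)).getD 0

def not_visible_2d (nums : List (List Int)) : List ((Int × Int) × Int) :=
  (PySem.List.enumerate (PySem.List.slice nums (some 1) (some (-1))) 1).flatMap (fun p =>
    (PySem.List.enumerate (PySem.List.slice p.2 (some 1) (some (-1))) 1).flatMap (fun q =>
      if pymax (PySem.List.slice p.2 none (some q.1)) < q.2 then [] else
      if pymax (PySem.List.slice p.2 (some (q.1 + 1)) none) < q.2 then [] else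
      let inverted := nums.map (fun x => PySem.List.pyGetD x q.1 0)
      if pymax (PySem.List.slice inverted none (some p.1)) < q.2 then [] else
      if pymax (PySem.List.slice inverted (some (p.1 + 1)) none) < q.2 then [] else
      [((p.1, q.1), q.2)]))


-- ===== PORT B =====
def prefixMax (xs : List Int) : List (Option Int) :=
  (xs.foldl
    (fun (acc : List (Option Int) × Option Int) v =>
      (acc.1 ++ [acc.2],
       match acc.2 with
       | none => some v
       | some m => if m < v then some v else some m))
    (([] : List (Option Int)), (none : Option Int))).1

def suffixMax (xs : List Int) : List (Option Int) := (prefixMax xs.reverse).reverse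

def oge (o : Option Int) (v : Int) : Bool :=
  match o with
  | some m => decide (v ≤ m)
  | none => false

def not_visible_2d_alt (nums : List (List Int)) : List ((Int × Int) × Int) :=
  if nums.length = 0 then [] else
  let w : Int := (PySem.List.min? (nums.map (fun r => (r.length : Int))) (fun y => y)).getD 0
  let ud := (PySem.List.pyRange 0 w 1).foldl
    (fun (acc : List (List (Option Int)) × List (List (Option Int))) j =>
      let col := nums.map (fun r => PySem.List.pyGetD r j 0)
      (acc.1 ++ [prefixMax col], acc.2 ++ [suffixMax col]))
    (([] : List (List (Option Int))), ([] : List (List (Option Int))))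
  (PySem.List.pyRange 1 ((nums.length : Int) - 1) 1).flatMap (fun i =>
    let row := PySem.List.pyGetD nums i []
    let left := prefixMax row
    let right := suffixMax row
    (PySem.List.pyRange 1 ((row.length : Int) - 1) 1).flatMap (fun j =>
      let v := PySem.List.pyGetD row j 0
      if oge (PySem.List.pyGetD left j none) v && oge (PySem.List.pyGetD right j none) v
         && oge (PySem.List.pyGetD (PySem.List.pyGetD ud.1 j []) i none) v
         && oge (PySem.List.pyGetD (PySem.List.pyGetD ud.2 j []) i none) v
      then [((i, j), v)] else []))


-- ===== PRECONDITION & SPEC =====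
-- 'cell (i,j) is blocked inside its own row': some value ≥ r[j] on each side (a plain Bool on the input)
def rowBlockedB (r : List Int) (j : Nat) : Bool :=
  ((r.take j).any (fun x => decide (r.getD j 0 ≤ x))) &&
  ((r.drop (j + 1)).any (fun x => decide (r.getD j 0 ≤ x)))

-- Pre_ excludes exactly the inputs on which A raises (IndexError): ragged grids where some row-blocked
-- interior cell makes A's column comprehension index a row that is too short. A returns on all of Pre_.
def Pre_not_visible_2d (nums : List (List Int)) : Prop :=
  ∀ i < nums.length, 1 ≤ i → i + 1 < nums.length →
    ∀ j < (nums.getD i []).length, 1 ≤ j → j + 1 < (nums.getD i []).length →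
      rowBlockedB (nums.getD i []) j = true → ∀ row ∈ nums, j < row.length


instance (nums : List (List Int)) : Decidable (Pre_not_visible_2d nums) := by
  unfold Pre_not_visible_2d
  have h2 : ∀ i : Nat,
      Decidable (1 ≤ i → i + 1 < nums.length →
        ∀ j < (nums.getD i []).length, 1 ≤ j → j + 1 < (nums.getD i []).length →
          rowBlockedB (nums.getD i []) j = true → ∀ row ∈ nums, j < row.length) := by
    intro i
    have h1 : ∀ j : Nat,
        Decidable (1 ≤ j → j + 1 < (nums.getD i []).length →
          rowBlockedB (nums.getD i []) j = true → ∀ row ∈ nums, j < row.length) := by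
      intro j; infer_instance
    infer_instance
  infer_instance

def pvWitness_not_visible_2d : List (List Int) := [[1, 1, 1], [1, 0, 1], [1, 1, 1]]

def Spec_not_visible_2d (nums : List (List Int)) (out : List ((Int × Int) × Int)) : Prop :=
  out = not_visible_2d_alt nums
instance (nums : List (List Int)) (out : List ((Int × Int) × Int)) : Decidable (Spec_not_visible_2d nums out) := by
  unfold Spec_not_visible_2d; infer_instance

-- ===== CLAIM (what is proved, stated in full; the proofs are below) =====
def Claim_equal_not_visible_2d : Prop :=
  ∀ (nums : List (List Int)), Dom_not_visible_2d nums → Pre_not_visible_2d nums →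
    Spec_not_visible_2d nums (not_visible_2d nums)

-- ===== LEMMAS AND PROOFS =====
theorem slice_one_neg_one {α : Type} (xs : List α) :
    PySem.List.slice xs (some 1) (some (-1)) = xs.tail.dropLast := by
  simp only [PySem.List.slice, Int.reduceNeg, Order.lt_one_iff, PySem.List.clampIdx_neg_ofNat,
    zero_le_one, PySem.List.clampIdx_of_nonneg, Int.toNat_one]
  rcases xs with _ | ⟨a, t⟩
  · rfl
  · simp [List.dropLast_eq_take]

theorem enumerate_flatMap {α β : Type} (d : α) (f : Int × α → List β) :
    ∀ (xs : List α) (s : Int),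
      (PySem.List.enumerate xs s).flatMap f
        = (List.range xs.length).flatMap (fun (k : Nat) => f (s + (k : Int), xs.getD k d)) := by
  intro xs
  induction xs with
  | nil => intro s; simp [PySem.List.enumerate]
  | cons x t ih =>
    intro s
    rw [PySem.List.enumerate_cons, List.flatMap_cons, ih (s + 1),
      List.length_cons, List.range_succ_eq_map, List.flatMap_cons, List.flatMap_map]
    simp only [List.getD_cons_zero, Nat.cast_zero, add_zero]
    congr 1
    apply List.flatMap_congr
    intro k _
    have h1 : s + ((Nat.succ k : Nat) : Int) = s + 1 + (k : Int) := by push_cast; ring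
    simp only [Nat.succ_eq_add_one, List.getD_cons_succ, h1]

theorem getD_tail_dropLast {α : Type} (l : List α) (k : Nat) (d : α) (h : k < l.length - 2) :
    (l.tail.dropLast).getD k d = l.getD (k + 1) d := by
  rw [List.getD_eq_getElem?_getD, List.getD_eq_getElem?_getD]
  rw [List.getElem?_dropLast, List.getElem?_tail]
  rw [if_pos (by simp [List.length_tail]; omega)]

def omax (m : Option Int) (v : Int) : Option Int :=
  match m with
  | none => some v
  | some m => if m < v then some v else some m

def isMaxOf (l : List Int) (m : Int) : Prop := m ∈ l ∧ ∀ y ∈ l, y ≤ m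

theorem isMaxOf_unique {l : List Int} {a b : Int} (ha : isMaxOf l a) (hb : isMaxOf l b) : a = b :=
  le_antisymm (hb.2 a ha.1) (ha.2 b hb.1)

theorem omax_some_eq (c v : Int) : omax (some c) v = some (max c v) := by
  simp only [omax]
  rcases lt_or_ge c v with h | h
  · rw [if_pos h, max_eq_right h.le]
  · rw [if_neg (not_lt.mpr h), max_eq_left h]

theorem foldl_omax_some (l : List Int) : ∀ c : Int, ∃ m, l.foldl omax (some c) = some m ∧ isMaxOf (c :: l) m := by
  induction l with
  | nil => intro c; exact ⟨c, rfl, by simp [isMaxOf]⟩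
  | cons v t ih =>
    intro c
    rcases ih (max c v) with ⟨m, hm, hmem, hle⟩
    refine ⟨m, ?_, ?_, ?_⟩
    · rw [List.foldl_cons, omax_some_eq, hm]
    · rcases List.mem_cons.mp hmem with h | h
      · rcases max_choice c v with hc | hc <;> rw [hc] at h <;> simp [h]
      · simp [h]
    · intro y hy
      simp only [List.mem_cons] at hy
      rcases hy with rfl | rfl | hy''
      · exact le_trans (le_max_left _ _) (hle (max y v) (by simp))
      · exact le_trans (le_max_right _ _) (hle (max c y) (by simp))
      · exact hle _ (List.mem_cons_of_mem _ hy'')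

theorem foldl_omax_total (l : List Int) (h : l ≠ []) : ∃ m, l.foldl omax none = some m ∧ isMaxOf l m := by
  rcases l with _ | ⟨x, t⟩
  · exact absurd rfl h
  · rcases foldl_omax_some t x with ⟨m, hm, hmax⟩
    exact ⟨m, by simpa [omax] using hm, hmax⟩

theorem pymax_isMax (l : List Int) (h : l ≠ []) : isMaxOf l (pymax l) := by
  rcases hm : PySem.List.max? l (fun y => y) with _ | m
  · exact absurd ((PySem.List.max?_eq_none_iff l (fun y => y)).mp hm) h
  · exact ⟨by simpa [pymax, hm] using PySem.List.max?_mem hm,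
      by simpa [pymax, hm] using PySem.List.max?_isMax hm⟩

theorem foldl_omax_eq_pymax (l : List Int) (h : l ≠ []) : l.foldl omax none = some (pymax l) := by
  rcases foldl_omax_total l h with ⟨m, hm, hmax⟩
  rw [hm, isMaxOf_unique hmax (pymax_isMax l h)]

theorem foldl_omax_reverse (l : List Int) : l.reverse.foldl omax none = l.foldl omax none := by
  rcases eq_or_ne l [] with rfl | h
  · rfl
  · rcases foldl_omax_total l h with ⟨m, hm, hmax⟩
    rcases foldl_omax_total l.reverse (by simpa using h) with ⟨m', hm', hmax'⟩
    rw [hm, hm', isMaxOf_unique (show isMaxOf l m' by simpa [isMaxOf] using hmax') hmax]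

theorem le_pymax_iff (l : List Int) (h : l ≠ []) (v : Int) : v ≤ pymax l ↔ ∃ x ∈ l, v ≤ x := by
  rcases pymax_isMax l h with ⟨hmem, hle⟩
  exact ⟨fun hv => ⟨pymax l, hmem, hv⟩, fun ⟨x, hx, hvx⟩ => le_trans hvx (hle x hx)⟩


def pmAux (m : Option Int) : List Int → List (Option Int)
  | [] => []
  | v :: t => m :: pmAux (omax m v) t

theorem foldl_pm (xs : List Int) : ∀ (acc : List (Option Int)) (m : Option Int),
    (xs.foldl
      (fun (acc : List (Option Int) × Option Int) v =>
        (acc.1 ++ [acc.2],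
         match acc.2 with
         | none => some v
         | some m => if m < v then some v else some m))
      (acc, m)).1 = acc ++ pmAux m xs := by
  induction xs with
  | nil => intro acc m; simp [pmAux]
  | cons v t ih =>
    intro acc m
    rw [List.foldl_cons]
    have := ih (acc ++ [m]) (omax m v)
    simpa [pmAux, omax] using this

theorem prefixMax_eq (xs : List Int) : prefixMax xs = pmAux none xs := by
  simpa using foldl_pm xs [] none

theorem length_pmAux (xs : List Int) : ∀ m, (pmAux m xs).length = xs.length := by
  induction xs with
  | nil => intro m; rfl
  | cons v t ih => intro m; simp [pmAux, ih]

theorem length_prefixMax (xs : List Int) : (prefixMax xs).length = xs.length := by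
  rw [prefixMax_eq]; exact length_pmAux xs none

theorem pmAux_getElem? (xs : List Int) : ∀ (m : Option Int) (j : Nat), j < xs.length →
    (pmAux m xs)[j]? = some ((xs.take j).foldl omax m) := by
  induction xs with
  | nil => intro m j h; simp at h
  | cons v t ih =>
    intro m j h
    cases j with
    | zero => simp [pmAux]
    | succ j => simpa [pmAux] using ih (omax m v) j (by simpa using h)

theorem prefixMax_getElem? (xs : List Int) (j : Nat) (h : j < xs.length) :
    (prefixMax xs)[j]? = some ((xs.take j).foldl omax none) := by
  rw [prefixMax_eq]; exact pmAux_getElem? xs none j h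

theorem suffixMax_getElem? (xs : List Int) (j : Nat) (h : j < xs.length) :
    (suffixMax xs)[j]? = some ((xs.drop (j + 1)).foldl omax none) := by
  unfold suffixMax
  have hl : (prefixMax xs.reverse).length = xs.length := by
    rw [length_prefixMax, List.length_reverse]
  rw [List.getElem?_reverse (by rw [hl]; exact h), hl]
  rw [prefixMax_getElem? _ _ (by rw [List.length_reverse]; omega)]
  rw [List.take_reverse]
  have : xs.length - (xs.length - 1 - j) = j + 1 := by omega
  rw [this, foldl_omax_reverse]

theorem prefixMax_getD_eq_pymax (xs : List Int) (j : Nat) (hj1 : 1 ≤ j) (hj : j < xs.length) :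
    (prefixMax xs).getD j none = some (pymax (xs.take j)) := by
  rw [List.getD_eq_getElem?_getD, prefixMax_getElem? xs j hj, Option.getD_some,
    foldl_omax_eq_pymax _ (by
      have : (xs.take j).length = j := by simp; omega
      intro hnil; rw [hnil] at this; simp at this; omega)]

theorem suffixMax_getD_eq_pymax (xs : List Int) (j : Nat) (hj : j + 1 < xs.length) :
    (suffixMax xs).getD j none = some (pymax (xs.drop (j + 1))) := by
  rw [List.getD_eq_getElem?_getD, suffixMax_getElem? xs j (by omega), Option.getD_some,
    foldl_omax_eq_pymax _ (by
      have : (xs.drop (j + 1)).length = xs.length - (j + 1) := by simp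
      intro hnil; rw [hnil] at this; simp at this; omega)]

theorem oge_some (m v : Int) : oge (some m) v = decide (v ≤ m) := rfl

theorem getD_map_range_cast {B : Type} (f : Int → B) (nN : Nat) (j : Nat) (d : B) (h : j < nN) :
    (List.map (f ∘ (fun (k : Nat) => (k : Int))) (List.range nN)).getD j d = f (j : Int) := by
  rw [List.getD_eq_getElem?_getD]
  simp [h]

theorem lt_minLen (nums : List (List Int)) (j : Nat) (hne : nums ≠ [])
    (hall : ∀ row ∈ nums, j < row.length) :
    ((j : Int)) < (PySem.List.min? (List.map (fun r => ((r.length : Nat) : Int)) nums) (fun y => y)).getD 0 := by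
  rcases hmn : PySem.List.min? (List.map (fun r => ((r.length : Nat) : Int)) nums) (fun y => y) with _ | mn
  · exact absurd (List.map_eq_nil_iff.mp ((PySem.List.min?_eq_none_iff _ _).mp hmn)) hne
  · rcases List.mem_map.mp (PySem.List.min?_mem hmn) with ⟨r, hr, hrm⟩
    have hj := hall r hr
    rw [hmn, Option.getD_some, ← hrm]
    exact_mod_cast hj

theorem ifchain {A : Type} (p1 p2 p3 p4 v : Int) (X : A) :
    (if p1 < v then ([] : List A) else if p2 < v then [] else if p3 < v then [] else
      if p4 < v then [] else [X]) =
    if (decide (v ≤ p1) && decide (v ≤ p2) && decide (v ≤ p3) && decide (v ≤ p4)) = true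
      then [X] else [] := by
  by_cases h1 : p1 < v <;> by_cases h2 : p2 < v <;> by_cases h3 : p3 < v <;>
    by_cases h4 : p4 < v <;> simp [h1, h2, h3, h4]

theorem ifchain_nb {A : Type} (p1 p2 v : Int) (x y : Bool) (X Z : List A)
    (h : p1 < v ∨ p2 < v) :
    (if p1 < v then ([] : List A) else if p2 < v then [] else Z) =
    if (decide (v ≤ p1) && decide (v ≤ p2) && x && y) = true then X else [] := by
  rcases h with h | h
  · simp [h, not_le.mpr h]
  · by_cases h1 : p1 < v <;> simp [h1, h, not_le.mpr h]

theorem le_pymax_of_not_lt {s : List Int} {v : Int} (hs : s ≠ []) :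
    ¬(∃ x ∈ s, v ≤ x) → pymax s < v := by
  intro hno
  by_contra hlt
  exact hno ((le_pymax_iff s hs v).mp (not_lt.mp hlt))


theorem main (nums : List (List Int)) (hPre : Pre_not_visible_2d nums) :
    not_visible_2d nums = not_visible_2d_alt nums := by
  by_cases h0 : nums.length = 0
  · rw [List.length_eq_zero_iff] at h0
    subst h0
    rfl
  · have toNat2 : ∀ m : Nat, (((m : Int)) - 1 - 1).toNat = m - 1 - 1 := by intro m; omega
    unfold not_visible_2d not_visible_2d_alt
    rw [if_neg h0]
    simp only [slice_one_neg_one, enumerate_flatMap ([] : List Int), enumerate_flatMap (0 : Int),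
      List.length_dropLast, List.length_tail, PySem.List.pyRange_one, toNat2, List.flatMap_map,
      PySem.List.foldl_prod_mk
        (f := fun (a : List (List (Option Int))) (j : Int) =>
          a ++ [prefixMax (List.map (fun r => PySem.List.pyGetD r j 0) nums)])
        (g := fun (a : List (List (Option Int))) (j : Int) =>
          a ++ [suffixMax (List.map (fun r => PySem.List.pyGetD r j 0) nums)]),
      PySem.List.foldl_append_singleton_eq_map, List.nil_append]
    apply List.flatMap_congr
    intro k hk
    rw [List.mem_range] at hk
    have cast1 : ∀ m : Nat, (1 : Int) + (m : Int) = ((m + 1 : Nat) : Int) := by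
      intro m; push_cast; ring
    have cast2 : ∀ m : Nat, ((m : Nat) : Int) + 1 = ((m + 1 : Nat) : Int) := by
      intro m; push_cast; ring
    simp only [cast1, cast2, zero_add, PySem.List.pyGetD_natCast,
      getD_tail_dropLast nums k [] (by omega : k < nums.length - 2), List.map_map]
    apply List.flatMap_congr
    intro l hl
    rw [List.mem_range] at hl
    have hEq : (nums[k + 1]?.getD []).length = (nums.getD (k + 1) []).length := by
      rw [List.getD_eq_getElem?_getD]
    simp only [getD_tail_dropLast (nums.getD (k + 1) []) l 0 (by omega : l < (nums.getD (k + 1) []).length - 2)]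
    -- A-side slices become take/drop
    simp only [PySem.List.slice_to_natCast, PySem.List.slice_from_natCast]
    -- B-side row-direction lookups become pymax of the same take/drop
    rw [prefixMax_getD_eq_pymax (nums.getD (k + 1) []) (l + 1) (by omega) (by omega),
      suffixMax_getD_eq_pymax (nums.getD (k + 1) []) (l + 1) (by omega), oge_some, oge_some]
    -- case split on whether the cell is blocked inside its own row
    by_cases hb : rowBlockedB (nums.getD (k + 1) []) (l + 1) = true
    · -- blocked: Pre_ gives that every row is long enough, so the column lookups are in range
      have hall : ∀ row ∈ nums, l + 1 < row.length :=
        hPre (k + 1) (by omega) (by omega) (by omega) (l + 1) (by omega) (by omega) (by omega) hb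
      have hne : nums ≠ [] := by intro h; rw [h] at h0; exact h0 rfl
      have hwlt : ((l + 1 : Nat) : Int) < (PySem.List.min? (List.map (fun r => ((r.length : Nat) : Int)) nums) (fun y => y)).getD 0 :=
        lt_minLen nums (l + 1) hne hall
      have hwN : l + 1 < (((PySem.List.min? (List.map (fun r => ((r.length : Nat) : Int)) nums) (fun y => y)).getD 0) - 0).toNat := by omega
      rw [getD_map_range_cast (fun x => prefixMax (List.map (fun r => PySem.List.pyGetD r x 0) nums)) _ (l + 1) [] hwN,
        getD_map_range_cast (fun x => suffixMax (List.map (fun r => PySem.List.pyGetD r x 0) nums)) _ (l + 1) [] hwN]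
      simp only [PySem.List.pyGetD_natCast]
      rw [prefixMax_getD_eq_pymax (List.map (fun r => r.getD (l + 1) 0) nums) (k + 1) (by omega) (by simp; omega),
        suffixMax_getD_eq_pymax (List.map (fun r => r.getD (l + 1) 0) nums) (k + 1) (by simp; omega),
        oge_some, oge_some]
      exact ifchain _ _ _ _ _ _
    · -- not blocked: the first two tests already discard the cell on both sides
      apply ifchain_nb
      simp only [rowBlockedB, Bool.and_eq_true, List.any_eq_true, decide_eq_true_eq] at hb
      rw [Decidable.not_and_iff_not_or_not] at hb
      rcases hb with hb | hb
      · left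
        apply le_pymax_of_not_lt (s := (nums.getD (k + 1) []).take (l + 1))
        · have : ((nums.getD (k + 1) []).take (l + 1)).length = l + 1 := by simp; omega
          intro hnil; rw [hnil] at this; simp at this
        · simpa using hb
      · right
        apply le_pymax_of_not_lt (s := (nums.getD (k + 1) []).drop (l + 1 + 1))
        · have : ((nums.getD (k + 1) []).drop (l + 1 + 1)).length = (nums.getD (k + 1) []).length - (l + 1 + 1) := by simp
          intro hnil; rw [hnil] at this; simp at this; omega
        · simpa using hb

-- ===== VERDICT (by name: the statement is the Claim_ definition above) =====
theorem not_visible_2d_spec : Claim_equal_not_visible_2d := by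
  intro nums _ hPre
  unfold Spec_not_visible_2d
  exact main nums hPre
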